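-- pv_equiv track=rewrite | github.com/IBM/nzpy | nzpy/numeric.py | inc_128
-- ===== SOURCE A (Python) =====
-- MAX_NUMERIC_DIGIT_COUNT = 4
--
-- HI32_MASK = 0xffffffff00000000
--
-- def isNumeric_Data_Negative(numdataP):
-- 	return (numdataP[0] & 0x80000000) != 0
--
-- def inc_128(arg ):
-- 	i = MAX_NUMERIC_DIGIT_COUNT
-- 	carry = True
-- 	bInputNegative = isNumeric_Data_Negative(arg)
--
-- 	while (i != 0) and carry :
-- 		i -= 1
-- 		work = (arg[i]) + 1
-- 		carry = (work & HI32_MASK) != 0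
-- 		arg[i] = work & 0xffffffff
--
-- 	if not bInputNegative :
-- 		return isNumeric_Data_Negative(arg)
-- 	else:
-- 		return False
-- ===== SOURCE B (Python) =====
-- # B: find the length of the trailing carry run first, then rewrite the touched
-- # words in one slice assignment (same in-place mutation as A; equivalence claim
-- # is about the return value).
-- HI32_MASK = 0xffffffff00000000
--
-- def inc_128(arg):
--     neg_before = (arg[0] & 0x80000000) != 0
--     # t = number of trailing words (among indices 3,2,1) whose increment overflows 32 bits
--     t = next((k for k in range(3) if not ((arg[3 - k] + 1) & HI32_MASK)), 3)
--     # the increment touches exactly the words at indices 3-t .. 3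
--     arg[3 - t:4] = [(w + 1) & 0xffffffff for w in arg[3 - t:4]]
--     return not neg_before and (arg[0] & 0x80000000) != 0
-- ===== Notes on version B (the rewrite author's own statement) =====
-- stated objective: alternative
-- what changed: Replaces the stateful carry/early-exit while loop that mutates as it goes by a two-phase scheme: first compute the trailing carry-run length with a generator over range(3), then rewrite exactly the touched words in one slice assignment with a comprehension.
import Mathlib
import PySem

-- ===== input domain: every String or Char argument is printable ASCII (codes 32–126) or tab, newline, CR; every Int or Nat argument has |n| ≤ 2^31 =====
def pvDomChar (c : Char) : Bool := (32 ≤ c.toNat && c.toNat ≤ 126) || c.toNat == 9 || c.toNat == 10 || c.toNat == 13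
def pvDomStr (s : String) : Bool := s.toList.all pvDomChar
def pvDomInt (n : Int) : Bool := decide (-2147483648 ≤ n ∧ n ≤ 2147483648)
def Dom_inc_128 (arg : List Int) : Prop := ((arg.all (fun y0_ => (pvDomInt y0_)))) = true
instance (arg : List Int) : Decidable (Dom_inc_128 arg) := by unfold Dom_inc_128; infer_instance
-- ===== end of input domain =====

-- B computes the trailing carry-run length first, then rewrites the touched words in one
-- slice assignment; same algorithmic cost, different decomposition.  Both A and B mutate
-- the argument list in place identically; the equivalence proved here is about the return value.

-- ===== PORT A =====
def isNumeric_Data_Negative (numdataP : List Int) : Bool :=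
  decide ((PySem.Int.band (PySem.List.pyGetD numdataP 0 0) 0x80000000) ≠ 0)

-- the while loop: i counts down, carry is the loop condition's second conjunct
def incLoopA : Nat → Bool → List Int → List Int
  | 0, _, arg => arg
  | _ + 1, false, arg => arg
  | i + 1, true, arg =>
      let work := PySem.List.pyGetD arg (i : Int) 0 + 1
      let carry := decide ((PySem.Int.band work 0xffffffff00000000) ≠ 0)
      incLoopA i carry (arg.set i (PySem.Int.band work 0xffffffff))

def inc_128 (arg : List Int) : Bool :=
  let bInputNegative := isNumeric_Data_Negative arg
  let arg' := incLoopA 4 true arg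
  if !bInputNegative then isNumeric_Data_Negative arg' else false

-- ===== PORT B =====
def inc_128_alt (arg : List Int) : Bool :=
  let negBefore := decide ((PySem.Int.band (PySem.List.pyGetD arg 0 0) 0x80000000) ≠ 0)
  let t : Int :=
    ((PySem.List.pyRange 0 3 1).find? (fun k =>
        !decide ((PySem.Int.band (PySem.List.pyGetD arg (3 - k) 0 + 1) 0xffffffff00000000) ≠ 0))).getD 3
  -- slice assignment arg[3-t:4] = [...] ported by hand (exact: 0 ≤ 3-t ≤ 3 under Pre_)
  let arg' := arg.take (3 - t).toNat
      ++ (PySem.List.slice arg (some (3 - t)) (some 4)).map (fun w => PySem.Int.band (w + 1) 0xffffffff)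
      ++ arg.drop 4
  (!negBefore) && decide ((PySem.Int.band (PySem.List.pyGetD arg' 0 0) 0x80000000) ≠ 0)

-- ===== PRECONDITION & SPEC =====
-- Pre_: A reads the first four words; Python raises IndexError on lists shorter than 4.
def Pre_inc_128 (arg : List Int) : Prop := 4 ≤ arg.length
instance (arg : List Int) : Decidable (Pre_inc_128 arg) := by unfold Pre_inc_128; infer_instance
def pvWitness_inc_128 : List Int := [0, 0, 0, 0]

def Spec_inc_128 (arg : List Int) (out : Bool) : Prop := out = inc_128_alt arg
instance (arg : List Int) (out : Bool) : Decidable (Spec_inc_128 arg out) := by unfold Spec_inc_128; infer_instance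

-- ===== CLAIM (what is proved, stated in full; the proofs are below) =====
def Claim_equal_inc_128 : Prop := ∀ (arg : List Int), Dom_inc_128 arg → Pre_inc_128 arg → Spec_inc_128 arg (inc_128 arg)

-- ===== LEMMAS AND PROOFS =====
theorem inc_128_eq_alt (a b c d : Int) (rest : List Int) :
    inc_128 (a :: b :: c :: d :: rest) = inc_128_alt (a :: b :: c :: d :: rest) := by
  have hr : PySem.List.pyRange 0 3 1 = [0, 1, 2] := by decide
  by_cases h3 : (PySem.Int.band (d + 1) 0xffffffff00000000) = 0 <;>
  by_cases h2 : (PySem.Int.band (c + 1) 0xffffffff00000000) = 0 <;>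
  by_cases h1 : (PySem.Int.band (b + 1) 0xffffffff00000000) = 0 <;>
    simp [inc_128, inc_128_alt, incLoopA, isNumeric_Data_Negative, hr,
      PySem.List.pyGetD_ofNat', PySem.List.slice_toNat, List.find?, h3, h2, h1]

-- ===== VERDICT (by name: the statement is the Claim_ definition above) =====
theorem inc_128_spec : Claim_equal_inc_128 := by
  intro arg _ hpre
  match arg, hpre with
  | a :: b :: c :: d :: rest, _ =>
    show inc_128 _ = inc_128_alt _
    exact inc_128_eq_alt a b c d rest
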